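-- pv_equiv track=rewrite | github.com/bunnycodec/LeetCode | Easy/Python - Solutions/LCE_1486.py | xorOperation
-- ===== SOURCE A (Python) =====
-- def xorOperation(n: int, start: int) -> int:
--     ans = start
--     n -= 1
--     while n > 0:
--         start += 2
--         ans ^= start
--         n -= 1
--
--     return ans
-- ===== SOURCE B (Python) =====
-- def _prefix_xor(x):
--     # XOR of all integers from 0 up/down to x along the canonical chain; closed form, period 4
--     r = x % 4
--     if r == 0:
--         return x
--     if r == 1:
--         return 1
--     if r == 2:
--         return x + 1
--     return 0
--
--
-- def xorOperation(n: int, start: int) -> int: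
--     if n <= 1:
--         return start
--     s, b = divmod(start, 2)
--     low = b if n % 2 else 0
--     return 2 * (_prefix_xor(s + n - 1) ^ _prefix_xor(s - 1)) ^ low
-- ===== Notes on version B (the rewrite author's own statement) =====
-- stated objective: faster
-- what changed: Replaces A's O(n) loop that xors start+2i term by term with an O(1) closed-form: split off the constant low bit via divmod, then xor the consecutive half-values with the period-4 prefix-xor formula.
import Mathlib
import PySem

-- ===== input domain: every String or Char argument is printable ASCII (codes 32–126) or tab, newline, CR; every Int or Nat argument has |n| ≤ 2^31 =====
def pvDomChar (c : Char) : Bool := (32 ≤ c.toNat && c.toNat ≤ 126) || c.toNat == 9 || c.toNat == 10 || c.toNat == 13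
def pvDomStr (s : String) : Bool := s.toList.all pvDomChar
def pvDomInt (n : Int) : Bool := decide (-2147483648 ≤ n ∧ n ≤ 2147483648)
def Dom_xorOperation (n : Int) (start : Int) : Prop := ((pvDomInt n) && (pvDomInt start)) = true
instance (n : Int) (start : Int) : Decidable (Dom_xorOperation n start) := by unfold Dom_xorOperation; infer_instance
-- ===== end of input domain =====

-- B replaces A's O(n) xor loop by the O(1) closed-form period-4 prefix-xor formula (low bit handled via divmod); equal on ALL Int inputs, including n <= 0 and negative start.

-- ===== PORT A =====
-- while n > 0: start += 2; ans ^= start; n -= 1   — the loop runs exactly (n-1).toNat times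
def xorOperationLoop : Nat → Int → Int → Int
  | 0, ans, _ => ans
  | k+1, ans, start => xorOperationLoop k (PySem.Int.bxor ans (start + 2)) (start + 2)

def xorOperation (n : Int) (start : Int) : Int :=
  xorOperationLoop (n - 1).toNat start start

-- ===== PORT B =====
-- _prefix_xor: r = x % 4; chain of returns
def prefixXor (x : Int) : Int :=
  if PySem.Int.mod x 4 = 0 then x
  else if PySem.Int.mod x 4 = 1 then 1
  else if PySem.Int.mod x 4 = 2 then x + 1
  else 0

def xorOperation_alt (n : Int) (start : Int) : Int :=
  if n ≤ 1 then start
  else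
    let s := PySem.Int.floordiv start 2
    let b := PySem.Int.mod start 2
    let low := if PySem.Int.mod n 2 ≠ 0 then b else 0
    PySem.Int.bxor (2 * PySem.Int.bxor (prefixXor (s + n - 1)) (prefixXor (s - 1))) low

-- ===== PRECONDITION & SPEC =====
def Spec_xorOperation (n : Int) (start : Int) (out : Int) : Prop := out = xorOperation_alt n start
instance (n : Int) (start : Int) (out : Int) : Decidable (Spec_xorOperation n start out) := by unfold Spec_xorOperation; infer_instance

-- ===== CLAIM (what is proved, stated in full; the proofs are below) =====
def Claim_equal_xorOperation : Prop := ∀ (n : Int) (start : Int), Dom_xorOperation n start → Spec_xorOperation n start (xorOperation n start)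

-- ===== LEMMAS AND PROOFS =====

-- Nat xor on a low bit
theorem natXor_even_even (a b : Nat) : 2*a ^^^ 2*b = 2*(a ^^^ b) := by
  have h := Nat.xor_bit false a false b
  simp [Nat.bit] at h; omega

theorem natXor_even_odd (a b : Nat) : 2*a ^^^ (2*b+1) = 2*(a ^^^ b)+1 := by
  have h := Nat.xor_bit false a true b
  simp [Nat.bit] at h; omega

theorem natXor_odd_odd (a b : Nat) : (2*a+1) ^^^ (2*b+1) = 2*(a ^^^ b) := by
  have h := Nat.xor_bit true a true b
  simp [Nat.bit] at h; omega

-- every Int is ↑m or -↑m-1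
theorem intShape (x : Int) : (∃ m : Nat, x = (m:Int)) ∨ (∃ m : Nat, x = -(m:Int)-1) := by
  by_cases h : 0 ≤ x
  · exact Or.inl ⟨x.toNat, by omega⟩
  · exact Or.inr ⟨(-x-1).toNat, by omega⟩

-- bxor on the two shapes
theorem bxor_nn (m n : Nat) : PySem.Int.bxor (m:Int) (n:Int) = ((m ^^^ n : Nat) : Int) :=
  PySem.Int.bxor_natCast m n

theorem bxor_nm (m n : Nat) : PySem.Int.bxor (m:Int) (-(n:Int)-1) = -((m ^^^ n : Nat) : Int) - 1 := by
  unfold PySem.Int.bxor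
  rw [if_pos (by omega), if_neg (by omega)]
  have h1 : ((m:Int)).toNat = m := by omega
  have h2 : (-(-(n:Int)-1)-1).toNat = n := by omega
  rw [h1, h2]

theorem bxor_mn (m n : Nat) : PySem.Int.bxor (-(m:Int)-1) (n:Int) = -((m ^^^ n : Nat) : Int) - 1 := by
  unfold PySem.Int.bxor
  rw [if_neg (by omega), if_pos (by omega)]
  have h1 : ((n:Int)).toNat = n := by omega
  have h2 : (-(-(m:Int)-1)-1).toNat = m := by omega
  rw [h1, h2]

theorem bxor_mm (m n : Nat) : PySem.Int.bxor (-(m:Int)-1) (-(n:Int)-1) = ((m ^^^ n : Nat) : Int) := by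
  unfold PySem.Int.bxor
  rw [if_neg (by omega), if_neg (by omega)]
  have h1 : (-(-(m:Int)-1)-1).toNat = m := by omega
  have h2 : (-(-(n:Int)-1)-1).toNat = n := by omega
  rw [h1, h2]

theorem bxor_assoc (x y z : Int) :
    PySem.Int.bxor (PySem.Int.bxor x y) z = PySem.Int.bxor x (PySem.Int.bxor y z) := by
  rcases intShape x with ⟨m, rfl⟩ | ⟨m, rfl⟩ <;>
  rcases intShape y with ⟨n, rfl⟩ | ⟨n, rfl⟩ <;>
  rcases intShape z with ⟨k, rfl⟩ | ⟨k, rfl⟩ <;>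
  simp [bxor_nm, bxor_mn, bxor_mm, Nat.xor_assoc]

theorem bxor_left_comm (x y z : Int) :
    PySem.Int.bxor x (PySem.Int.bxor y z) = PySem.Int.bxor y (PySem.Int.bxor x z) := by
  rw [← bxor_assoc, PySem.Int.bxor_comm x y, bxor_assoc]

theorem bxor_zero_left (x : Int) : PySem.Int.bxor 0 x = x := by
  rw [PySem.Int.bxor_comm]; exact PySem.Int.bxor_zero x

theorem bxor_self_left (x y : Int) : PySem.Int.bxor x (PySem.Int.bxor x y) = y := by
  rw [← bxor_assoc, PySem.Int.bxor_self, bxor_zero_left]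

theorem bxor_two_mul (x y : Int) :
    PySem.Int.bxor (2*x) (2*y) = 2 * PySem.Int.bxor x y := by
  rcases intShape x with ⟨m, rfl⟩ | ⟨m, rfl⟩ <;> rcases intShape y with ⟨n, rfl⟩ | ⟨n, rfl⟩
  · have e1 : 2*((m:Int)) = ((2*m : Nat) : Int) := by push_cast; ring
    have e2 : 2*((n:Int)) = ((2*n : Nat) : Int) := by push_cast; ring
    rw [e1, e2, bxor_nn, bxor_nn, natXor_even_even]; push_cast; ring
  · have e1 : 2*((m:Int)) = ((2*m : Nat) : Int) := by push_cast; ring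
    have e2 : 2*(-(n:Int)-1) = -((2*n+1 : Nat) : Int)-1 := by push_cast; ring
    rw [e1, e2, bxor_nm, bxor_nm, natXor_even_odd]; push_cast; ring
  · have e1 : 2*(-(m:Int)-1) = -((2*m+1 : Nat) : Int)-1 := by push_cast; ring
    have e2 : 2*((n:Int)) = ((2*n : Nat) : Int) := by push_cast; ring
    rw [e1, e2, bxor_mn, bxor_mn]
    have h : (2*m+1) ^^^ (2*n) = 2*(m ^^^ n)+1 := by
      rw [Nat.xor_comm, natXor_even_odd, Nat.xor_comm]
    rw [h]; push_cast; ring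
  · have e1 : 2*(-(m:Int)-1) = -((2*m+1 : Nat) : Int)-1 := by push_cast; ring
    have e2 : 2*(-(n:Int)-1) = -((2*n+1 : Nat) : Int)-1 := by push_cast; ring
    rw [e1, e2, bxor_mm, bxor_mm, natXor_odd_odd]; push_cast; ring

theorem bxor_two_mul_one (x : Int) : PySem.Int.bxor (2*x) 1 = 2*x + 1 := by
  rcases intShape x with ⟨m, rfl⟩ | ⟨m, rfl⟩
  · have e1 : 2*((m:Int)) = ((2*m : Nat) : Int) := by push_cast; ring
    have h := bxor_nn (2*m) 1
    rw [Nat.cast_one] at h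
    have hx : 2*m ^^^ 1 = 2*m+1 := by have := natXor_even_odd m 0; simpa using this
    rw [e1, h, hx]; push_cast; ring
  · have e1 : 2*(-(m:Int)-1) = -((2*m+1 : Nat) : Int)-1 := by push_cast; ring
    have h := bxor_mn (2*m+1) 1
    rw [Nat.cast_one] at h
    have hx : (2*m+1) ^^^ 1 = 2*m := by have := natXor_odd_odd m 0; simp at this; omega
    rw [e1, h, hx]; push_cast; ring

-- prefixXor recurrence: prefixXor x = prefixXor (x-1) ^ x
theorem prefixXor_rec (x : Int) :
    prefixXor x = PySem.Int.bxor (prefixXor (x-1)) x := by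
  have hm : ∀ y : Int, PySem.Int.mod y 4 = y % 4 := fun y =>
    PySem.Int.mod_eq_emod_of_pos (by norm_num)
  have h4 : x % 4 = 0 ∨ x % 4 = 1 ∨ x % 4 = 2 ∨ x % 4 = 3 := by omega
  unfold prefixXor
  simp only [hm]
  rcases h4 with h | h | h | h
  · rw [if_pos h, if_neg (by omega), if_neg (by omega), if_neg (by omega), bxor_zero_left]
  · rw [if_neg (by omega), if_pos h, if_pos (by omega)]
    obtain ⟨u, hu⟩ : ∃ u : Int, x - 1 = 2*u := ⟨(x-1)/2, by omega⟩
    have hx : x = 2*u + 1 := by omega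
    rw [hu, hx, ← bxor_two_mul_one u, bxor_self_left]
  · rw [if_neg (by omega), if_neg (by omega), if_pos h, if_neg (by omega), if_pos (by omega)]
    obtain ⟨u, hu⟩ : ∃ u : Int, x = 2*u := ⟨x/2, by omega⟩
    rw [hu, PySem.Int.bxor_comm, bxor_two_mul_one]
  · rw [if_neg (by omega), if_neg (by omega), if_neg (by omega), if_neg (by omega),
        if_neg (by omega), if_pos (by omega)]
    have hx : x - 1 + 1 = x := by ring
    rw [hx, PySem.Int.bxor_self]

theorem prefixXor_cancel (x : Int) :
    PySem.Int.bxor (prefixXor x) (prefixXor (x-1)) = x := by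
  rw [prefixXor_rec x, PySem.Int.bxor_comm, bxor_self_left]

-- start = 2*(start//2) ^ (start%2)
theorem start_decomp (start : Int) :
    PySem.Int.bxor (2 * PySem.Int.floordiv start 2) (PySem.Int.mod start 2) = start := by
  rw [PySem.Int.floordiv_eq_ediv_of_pos (by norm_num),
      PySem.Int.mod_eq_emod_of_pos (by norm_num)]
  have hb : start % 2 = 0 ∨ start % 2 = 1 := by omega
  rcases hb with h | h
  · rw [h, PySem.Int.bxor_zero]; omega
  · rw [h, bxor_two_mul_one]; omega

-- the xor of the k values start+2, start+4, …, start+2k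
def tailXor : Nat → Int → Int
  | 0, _ => 0
  | k+1, s => PySem.Int.bxor (s + 2) (tailXor k (s + 2))

theorem loop_eq (k : Nat) : ∀ ans start : Int,
    xorOperationLoop k ans start = PySem.Int.bxor ans (tailXor k start) := by
  induction k with
  | zero => intro ans start; simp [xorOperationLoop, tailXor, PySem.Int.bxor_zero]
  | succ k ih =>
    intro ans start
    rw [xorOperationLoop, ih, tailXor, ← bxor_assoc]

-- the closed form of B's else branch, with the element count as an explicit Int
def altBody (m : Int) (start : Int) : Int :=
  PySem.Int.bxor
    (2 * PySem.Int.bxor (prefixXor (PySem.Int.floordiv start 2 + m - 1))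
      (prefixXor (PySem.Int.floordiv start 2 - 1)))
    (if PySem.Int.mod m 2 ≠ 0 then PySem.Int.mod start 2 else 0)

theorem main_ind (k : Nat) : ∀ start : Int,
    PySem.Int.bxor start (tailXor k start) = altBody ((k:Int)+1) start := by
  induction k with
  | zero =>
    intro start
    rw [tailXor, PySem.Int.bxor_zero]
    unfold altBody
    have harg : PySem.Int.floordiv start 2 + (((0:Nat):Int)+1) - 1 = PySem.Int.floordiv start 2 := by
      push_cast; ring
    have hcond : PySem.Int.mod (((0:Nat):Int)+1) 2 ≠ 0 := by
      rw [PySem.Int.mod_eq_emod_of_pos (by norm_num)]; decide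
    rw [harg, if_pos hcond, prefixXor_cancel, start_decomp]
  | succ k ih =>
    intro start
    rw [tailXor, ih (start+2)]
    -- abbreviations
    have hfd : ∀ y : Int, PySem.Int.floordiv y 2 = y / 2 := fun y =>
      PySem.Int.floordiv_eq_ediv_of_pos (by norm_num)
    have hmd : ∀ y : Int, PySem.Int.mod y 2 = y % 2 := fun y =>
      PySem.Int.mod_eq_emod_of_pos (by norm_num)
    unfold altBody
    have hs : PySem.Int.floordiv (start+2) 2 = PySem.Int.floordiv start 2 + 1 := by
      rw [hfd, hfd]; omega
    have hb : PySem.Int.mod (start+2) 2 = PySem.Int.mod start 2 := by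
      rw [hmd, hmd]; omega
    rw [hs, hb]
    set s := PySem.Int.floordiv start 2 with hsdef
    set b := PySem.Int.mod start 2 with hbdef
    have harg1 : s + 1 + (((k:Int))+1) - 1 = s + (k:Int) + 1 := by ring
    have harg2 : s + (((k+1:Nat):Int)+1) - 1 = s + (k:Int) + 1 := by push_cast; ring
    have harg3 : s + 1 - 1 = s := by ring
    rw [harg1, harg2, harg3]
    -- p (s-1) = p s ^ s
    have hp : prefixXor (s - 1) = PySem.Int.bxor (prefixXor s) s := by
      conv_rhs => rw [prefixXor_rec s]
      rw [bxor_assoc, PySem.Int.bxor_self, PySem.Int.bxor_zero]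
    have hstart : start = PySem.Int.bxor (2 * s) b := (start_decomp start).symm
    -- the two low bits combine: b ^ L(k+1) = L(k+2)
    have hlow : PySem.Int.bxor b (if PySem.Int.mod ((k:Int)+1) 2 ≠ 0 then b else 0)
        = (if PySem.Int.mod (((k+1:Nat):Int)+1) 2 ≠ 0 then b else 0) := by
      rw [hmd, hmd]
      by_cases hk : ((k:Int)+1) % 2 = 0
      · rw [if_neg (by omega), if_pos (by push_cast; omega), PySem.Int.bxor_zero]
      · rw [if_pos (by omega), if_neg (by push_cast; omega), PySem.Int.bxor_self]
    -- pure xor algebra on the atoms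
    have key : ∀ P PS S B L1 L2 : Int, PySem.Int.bxor B L1 = L2 →
        PySem.Int.bxor (PySem.Int.bxor (2*S) B)
          (PySem.Int.bxor (2 * PySem.Int.bxor P PS) L1)
        = PySem.Int.bxor (2 * PySem.Int.bxor P (PySem.Int.bxor PS S)) L2 := by
      intro P PS S B L1 L2 hL
      rw [← hL]
      have h3 : PySem.Int.bxor (2 * PySem.Int.bxor P PS) (2*S)
          = 2 * PySem.Int.bxor P (PySem.Int.bxor PS S) := by
        rw [bxor_two_mul, bxor_assoc]
      rw [← h3]
      simp [bxor_left_comm, PySem.Int.bxor_comm]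
    rw [hp]
    conv_lhs => rw [hstart]
    exact key (prefixXor (s + (k:Int) + 1)) (prefixXor s) s b _ _ hlow

theorem xorOperation_eq (n start : Int) : xorOperation n start = xorOperation_alt n start := by
  by_cases h : n ≤ 1
  · have h0 : (n - 1).toNat = 0 := by omega
    simp [xorOperation, h0, xorOperationLoop, xorOperation_alt, if_pos h]
  · have hk : ((n-1).toNat : Int) = n - 1 := by omega
    have := main_ind (n-1).toNat start
    rw [hk] at this
    have hn : n - 1 + 1 = n := by ring
    rw [hn] at this
    rw [xorOperation, loop_eq, this]
    rw [xorOperation_alt, if_neg h]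
    rfl

-- ===== VERDICT (by name: the statement is the Claim_ definition above) =====
theorem xorOperation_spec : Claim_equal_xorOperation := by
  intro n start _
  unfold Spec_xorOperation
  exact xorOperation_eq n start
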